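-- pv_equiv track=rewrite | github.com/msmedes/advent | 2022/python/10.py | get_signal_strengths
-- ===== SOURCE A (Python) =====
-- from collections import defaultdict
--
-- def get_signal_strengths(lines):
--     register = 1
--     cycle = 1
--     signal_strengths = defaultdict(int)
--     for line in lines:
--         cycle += 1
--         if line not in {'addx', 'noop'}:
--             register += int(line)
--         signal_strengths[cycle] = cycle * register
--     return signal_strengths
-- ===== SOURCE B (Python) =====
-- from collections import defaultdict
--
--
-- def get_signal_strengths(lines):
--     deltas = [0 if line in ('addx', 'noop') else int(line) for line in lines]
--     result = defaultdict(int)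
--     for c in range(2, len(deltas) + 2):
--         result[c] = c * (1 + sum(deltas[:c - 1]))
--     return result
-- ===== Notes on version B (the rewrite author's own statement) =====
-- stated objective: alternative
-- what changed: B keeps no running state at all: it maps each line to a delta once, then for every cycle c recomputes the register from scratch as 1 + sum(deltas[:c-1]) inside a range loop, instead of A's single fused loop that mutates register/cycle as it goes.
import Mathlib
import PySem

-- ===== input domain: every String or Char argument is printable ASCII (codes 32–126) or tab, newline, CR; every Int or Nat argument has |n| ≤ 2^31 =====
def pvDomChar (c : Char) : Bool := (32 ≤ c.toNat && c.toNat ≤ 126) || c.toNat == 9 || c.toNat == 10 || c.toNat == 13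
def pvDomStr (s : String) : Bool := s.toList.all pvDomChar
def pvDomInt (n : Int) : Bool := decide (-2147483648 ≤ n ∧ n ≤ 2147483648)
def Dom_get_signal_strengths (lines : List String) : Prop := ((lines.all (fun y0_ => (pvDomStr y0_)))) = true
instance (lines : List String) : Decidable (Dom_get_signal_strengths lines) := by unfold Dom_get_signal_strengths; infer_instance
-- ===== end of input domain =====

-- B replaces A's single running-state loop (mutable register/cycle) by a stateless per-cycle
-- recomputation: the register at cycle c is recomputed from scratch as 1 + sum(deltas[:c-1])
-- (objective: alternative — O(n^2) instead of O(n), no accumulated state).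

-- ===== PORT A =====
-- A: one fused loop, state (register, cycle, dict); int(line) ported as PySem.Int.ofStr?
-- (Pre_ excludes the ValueError case, where ofStr? is none; .getD 0 is never reached there).
def get_signal_strengths (lines : List String) : List (Int × Int) :=
  (lines.foldl
    (fun (st : Int × Int × PySem.Dict Int Int) line =>
      let register := st.1
      let cycle := st.2.1 + 1
      let register :=
        if !(line == "addx" || line == "noop") then register + (PySem.Int.ofStr? line).getD 0
        else register
      (register, cycle, st.2.2.insert cycle (cycle * register)))
    (1, 1, PySem.Dict.empty)).2.2.items

-- ===== PORT B =====
-- B: map lines to deltas once, then for each cycle c in range(2, len+2) recompute the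
-- register as 1 + sum(deltas[:c-1]) and insert c * register into a fresh dict.
def bDelta (line : String) : Int :=
  if line == "addx" || line == "noop" then 0 else (PySem.Int.ofStr? line).getD 0

def get_signal_strengths_alt (lines : List String) : List (Int × Int) :=
  let deltas := lines.map bDelta
  ((PySem.List.pyRange 2 ((deltas.length : Int) + 2) 1).foldl
    (fun (d : PySem.Dict Int Int) c =>
      d.insert c (c * (1 + (PySem.List.slice deltas none (some (c - 1))).sum)))
    PySem.Dict.empty).items

-- ===== PRECONDITION & SPEC =====
-- Pre_ excludes exactly the inputs where A raises ValueError: a line that is neither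
-- 'addx' nor 'noop' nor a valid int(...) literal.
def Pre_get_signal_strengths (lines : List String) : Prop :=
  ∀ line ∈ lines, line = "addx" ∨ line = "noop" ∨ (PySem.Int.ofStr? line).isSome

instance (lines : List String) : Decidable (Pre_get_signal_strengths lines) := by
  unfold Pre_get_signal_strengths; infer_instance

def pvWitness_get_signal_strengths : List String := ["noop", "addx", "3", "addx", "-5"]

def Spec_get_signal_strengths (lines : List String) (out : List (Int × Int)) : Prop :=
  out = get_signal_strengths_alt lines
instance (lines : List String) (out : List (Int × Int)) : Decidable (Spec_get_signal_strengths lines out) := by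
  unfold Spec_get_signal_strengths; infer_instance

-- ===== CLAIM (what is proved, stated in full; the proofs are below) =====
def Claim_equal_get_signal_strengths : Prop :=
  ∀ (lines : List String), Dom_get_signal_strengths lines →
    Pre_get_signal_strengths lines →
    Spec_get_signal_strengths lines (get_signal_strengths lines)

-- ===== LEMMAS AND PROOFS =====

-- common spec list: entries ((c+1), (c+1)*(r+δ)) with running register and cycle
def specList (r c : Int) : List Int → List (Int × Int)
  | [] => []
  | δ :: ds => (c + 1, (c + 1) * (r + δ)) :: specList (r + δ) (c + 1) ds

theorem loopA (ds : List String) (r c : Int) (d : PySem.Dict Int Int)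
    (hd : ∀ k ∈ d.keys, k ≤ c) :
    (ds.foldl
      (fun (st : Int × Int × PySem.Dict Int Int) line =>
        let register := st.1
        let cycle := st.2.1 + 1
        let register :=
          if !(line == "addx" || line == "noop") then register + (PySem.Int.ofStr? line).getD 0
          else register
        (register, cycle, st.2.2.insert cycle (cycle * register)))
      (r, c, d)).2.2.items = d.items ++ specList r c (ds.map bDelta) := by
  induction ds generalizing r c d with
  | nil => simp [specList]
  | cons line ds ih =>
    simp only [List.foldl_cons, List.map_cons, specList]
    have hr : (if !(line == "addx" || line == "noop")
        then r + (PySem.Int.ofStr? line).getD 0 else r) = r + bDelta line := by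
      unfold bDelta
      by_cases h : (line == "addx" || line == "noop") <;> simp [h]
    have hnc : d.contains (c + 1) = false := by
      rw [PySem.Dict.contains_eq_decide_mem_keys]
      simp only [decide_eq_false_iff_not]
      intro hmem; have := hd _ hmem; omega
    rw [hr]
    rw [ih (r + bDelta line) (c + 1) _ (by
      intro k hk
      rcases (PySem.Dict.mem_keys_insert _ _ _ _).1 hk with h | h
      · omega
      · have := hd _ h; omega)]
    rw [PySem.Dict.items_insert, hnc]
    simp

-- closed form of specList: the k-th entry recomputes the register as r + sum(take (k+1))
theorem specList_formula (ds : List Int) (r c : Int) :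
    specList r c ds = (List.range ds.length).map
      (fun (k : Nat) => (c + (k : Int) + 1, (c + (k : Int) + 1) * (r + (ds.take (k + 1)).sum))) := by
  induction ds generalizing r c with
  | nil => simp [specList]
  | cons δ ds ih =>
    simp only [specList, List.length_cons, List.range_succ_eq_map, List.map_cons,
      List.map_map]
    refine List.cons_eq_cons.mpr ⟨by simp, ?_⟩
    rw [ih (r + δ) (c + 1)]
    apply List.map_congr_left
    intro k _
    simp only [Function.comp_apply, Nat.succ_eq_add_one, List.take_succ_cons, List.sum_cons]
    push_cast
    refine Prod.ext ?_ ?_ <;> simp <;> ring_nf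

-- ===== VERDICT (by name: the statement is the Claim_ definition above) =====
theorem get_signal_strengths_spec : Claim_equal_get_signal_strengths := by
  intro lines _ _
  unfold Spec_get_signal_strengths
  simp only [get_signal_strengths, get_signal_strengths_alt]
  rw [loopA lines 1 1 PySem.Dict.empty (by simp [PySem.Dict.keys_empty])]
  set ds := lines.map bDelta with hds
  have hfresh := PySem.Dict.items_foldl_insert_fresh
    (l := PySem.List.pyRange 2 ((ds.length : Int) + 2) 1)
    (k := fun c => c)
    (v := fun c => c * (1 + (PySem.List.slice ds none (some (c - 1))).sum))
    (d := PySem.Dict.empty)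
    (by simp [PySem.Dict.contains_empty])
    (by simpa using PySem.List.nodup_pyRange_one 2 ((ds.length : Int) + 2))
  rw [hfresh, show (PySem.Dict.empty : PySem.Dict Int Int).items = [] from rfl, List.nil_append]
  rw [specList_formula]
  rw [PySem.List.pyRange_one]
  have hlen : (((ds.length : Int) + 2) - 2).toNat = ds.length := by omega
  rw [hlen, List.map_map]
  apply List.map_congr_left
  intro k _
  simp only [Function.comp_apply]
  have hidx : (2 : Int) + (k : Int) - 1 = ((k + 1 : Nat) : Int) := by push_cast; ring
  rw [hidx, PySem.List.slice_to_natCast]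
  refine Prod.ext (by ring) (by ring)
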